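-- pv_equiv track=rewrite | github.com/guileen/guileen.github.com | snippets/py2048/ai_rule.py | compare_left_right_same_down
-- ===== SOURCE A (Python) =====
-- W = 8
--
-- H = 8
--
-- LEFT = 1
--
-- RIGHT = 2
--
-- def compare_left_right_same_down(map,y):
--   # 检查该行，向左，向右之后是否与下方重合，如果重合，则选择该方向。
--   def move_row(start, end, step):
--     row_after = [0 for i in range(W)]
--     p = start
--     for i in range(start, end, step):
--       block = map[y][i]
--       if block != 0:
--         if row_after[p] == 0:
--           row_after[p] = block
--         elif row_after[p] == block:
--           row_after[p] += block
--         else: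
--           p+=step
--           row_after[p] = block
--     return row_after
--   def check_same_down(row):
--     # 检查与下方相同的价值
--     value = 0
--     for i in range(W):
--       if row[i] == map[y+1][i]:
--         # 奇数行右侧相同价值大，偶数行左侧相同价值大，每格价值相加
--         value += 2**(y%2==0 and W-i or i+1) + map[y+1][i]
--     return value
--   if y == H-1:
--     return 0
--   lvalue = check_same_down(move_row(0, W, 1))
--   rvalue = check_same_down(move_row(W-1,-1,-1))
--   if lvalue!=0 or rvalue!=0:
--     return lvalue > rvalue and LEFT or RIGHT
--   return 0
-- ===== SOURCE B (Python) =====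
-- W = 8
--
-- H = 8
--
-- LEFT = 1
--
-- RIGHT = 2
--
-- def compare_left_right_same_down(map, y):
--   # Recursive decomposition: group the nonzero tiles into maximal cascading-merge
--   # groups (each group collapses to its running sum), and score each tilt directly
--   # from the packed list with index arithmetic, never materializing shifted rows.
--   if y == H - 1:
--     return 0
--   below = map[y + 1]
--   tiles = [t for t in map[y][:W] if t != 0]
--
--   def pack(ts):
--     if not ts:
--       return []
--     acc, k = ts[0], 1
--     while k < len(ts) and ts[k] == acc:
--       acc += ts[k]
--       k += 1
--     return [acc] + pack(ts[k:])
--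
--   lp = pack(tiles)
--   rp = pack(tiles[::-1])
--   k, m = len(lp), len(rp)
--
--   def score(at):
--     total = 0
--     for i in range(W):
--       if at(i) == below[i]:
--         total += 2 ** (W - i if y % 2 == 0 else i + 1) + below[i]
--     return total
--
--   lvalue = score(lambda i: lp[i] if i < k else 0)
--   rvalue = score(lambda i: rp[W - 1 - i] if i >= W - m else 0)
--   if lvalue != 0 or rvalue != 0:
--     return LEFT if lvalue > rvalue else RIGHT
--   return 0
-- ===== Notes on version B (the rewrite author's own statement) =====
-- stated objective: alternative
-- what changed: Replaces A's in-place pointer walk over a preallocated 8-slot row (run twice with step +1/-1) by a recursive pack that consumes maximal cascading-merge groups of the nonzero tiles (reusing one tiles list, reversed for the right tilt) and scores each direction directly from the packed list with index arithmetic, never building the shifted rows.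
import Mathlib
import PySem

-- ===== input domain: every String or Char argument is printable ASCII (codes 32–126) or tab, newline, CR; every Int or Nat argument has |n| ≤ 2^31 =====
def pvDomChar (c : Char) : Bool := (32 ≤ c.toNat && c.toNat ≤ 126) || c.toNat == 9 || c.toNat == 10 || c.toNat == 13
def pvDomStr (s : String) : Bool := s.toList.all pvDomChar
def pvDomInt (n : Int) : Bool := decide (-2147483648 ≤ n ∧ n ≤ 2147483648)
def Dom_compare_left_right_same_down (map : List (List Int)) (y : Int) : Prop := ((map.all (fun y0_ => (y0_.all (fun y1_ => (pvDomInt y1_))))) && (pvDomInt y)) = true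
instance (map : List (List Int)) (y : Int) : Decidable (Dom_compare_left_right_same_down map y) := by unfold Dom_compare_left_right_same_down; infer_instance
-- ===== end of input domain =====

-- B packs the nonzero tiles by recursively consuming maximal cascading-merge groups and
-- scores each tilt directly from the packed list, instead of A's in-place pointer walk
-- over a preallocated row run once per direction (objective: alternative).

-- ===== PORT A =====
-- A's move_row: fold over range(start, end, step) carrying (row_after, p).
-- Exponents 2**e have e ∈ 1..8 here, so `.toNat` on the exponent is exact.
def pvMoveRowA (row : List Int) (start stop step : Int) : List Int :=
  ((PySem.List.pyRange start stop step).foldl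
    (fun (st : List Int × Int) i =>
      let block := PySem.List.pyGetD row i 0
      if block ≠ 0 then
        if PySem.List.pyGetD st.1 st.2 0 = 0 then
          (PySem.List.pySetD st.1 st.2 block, st.2)
        else if PySem.List.pyGetD st.1 st.2 0 = block then
          (PySem.List.pySetD st.1 st.2 (PySem.List.pyGetD st.1 st.2 0 + block), st.2)
        else
          (PySem.List.pySetD st.1 (st.2 + step) block, st.2 + step)
      else st)
    (List.replicate 8 0, start)).1

-- A's check_same_down; the exponent transcribes Python's `y%2==0 and W-i or i+1`
-- (the `or` falls through when W-i would be 0).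
def pvCheckA (below : List Int) (y : Int) (row : List Int) : Int :=
  (PySem.List.pyRange 0 8 1).foldl
    (fun value i =>
      if PySem.List.pyGetD row i 0 = PySem.List.pyGetD below i 0 then
        value + 2 ^ (if PySem.Int.mod y 2 = 0 ∧ 8 - i ≠ 0 then (8 - i).toNat else (i + 1).toNat)
          + PySem.List.pyGetD below i 0
      else value) 0

def compare_left_right_same_down (map : List (List Int)) (y : Int) : Int :=
  if y = 8 - 1 then 0
  else
    let row := (PySem.List.pyGet? map y).getD []
    let below := (PySem.List.pyGet? map (y + 1)).getD []
    let lvalue := pvCheckA below y (pvMoveRowA row 0 8 1)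
    let rvalue := pvCheckA below y (pvMoveRowA row 7 (-1) (-1))
    if lvalue ≠ 0 ∨ rvalue ≠ 0 then (if lvalue > rvalue then 1 else 2) else 0

-- ===== PORT B =====
-- B's pack(): inner while loop consuming one maximal cascading-merge group.
def pvConsume (a : Int) : List Int → Int × List Int
  | [] => (a, [])
  | t :: r => if t = a then pvConsume (a + t) r else (a, t :: r)

lemma pvConsume_len_le (a : Int) (l : List Int) : (pvConsume a l).2.length ≤ l.length := by
  induction l generalizing a with
  | nil => simp [pvConsume]
  | cons t r ih =>
    by_cases h : t = a
    · simpa [pvConsume, h] using le_trans (ih (a + t)) (Nat.le_succ _)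
    · simp [pvConsume, h]

-- B's pack(): recursion producing one merged group per element of the output.
def pvPackRec : List Int → List Int
  | [] => []
  | t :: r => (pvConsume t r).1 :: pvPackRec (pvConsume t r).2
termination_by l => l.length
decreasing_by
  exact Nat.lt_succ_of_le (pvConsume_len_le t r)

-- B's score(at): fold over range(W) with the direction's getter.
def pvScoreB (below : List Int) (y : Int) (at_ : Int → Int) : Int :=
  (PySem.List.pyRange 0 8 1).foldl
    (fun total i =>
      let b := PySem.List.pyGetD below i 0
      if at_ i = b then
        total + 2 ^ (if PySem.Int.mod y 2 = 0 then (8 - i).toNat else (i + 1).toNat) + b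
      else total) 0

def compare_left_right_same_down_alt (map : List (List Int)) (y : Int) : Int :=
  if y = 8 - 1 then 0
  else
    let below := (PySem.List.pyGet? map (y + 1)).getD []
    let tiles := (PySem.List.slice ((PySem.List.pyGet? map y).getD []) none (some 8)).filter
      (fun t => t != 0)
    let lp := pvPackRec tiles
    let rp := pvPackRec tiles.reverse
    let k := (lp.length : Int)
    let m := (rp.length : Int)
    let lvalue := pvScoreB below y (fun i => if i < k then PySem.List.pyGetD lp i 0 else 0)
    let rvalue := pvScoreB below y (fun i => if 8 - m ≤ i then PySem.List.pyGetD rp (8 - 1 - i) 0 else 0)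
    if lvalue ≠ 0 ∨ rvalue ≠ 0 then (if lvalue > rvalue then 1 else 2) else 0

-- ===== PRECONDITION & SPEC =====
-- Pre_ excludes exactly the inputs where A raises IndexError: y ≠ H-1 with row y or
-- row y+1 missing (Python negative indices wrap; pyGet? models that) or shorter than W=8.
def Pre_compare_left_right_same_down (map : List (List Int)) (y : Int) : Prop :=
  y = 7 ∨ (8 ≤ ((PySem.List.pyGet? map y).getD []).length ∧ 8 ≤ ((PySem.List.pyGet? map (y + 1)).getD []).length)
instance (map : List (List Int)) (y : Int) : Decidable (Pre_compare_left_right_same_down map y) := by unfold Pre_compare_left_right_same_down; infer_instance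

def pvWitness_compare_left_right_same_down : List (List Int) × Int :=
  ([[2, 2, 4, 0, 0, 0, 0, 0], [8, 0, 0, 0, 0, 0, 0, 8]], 0)

def Spec_compare_left_right_same_down (map : List (List Int)) (y : Int) (out : Int) : Prop := out = compare_left_right_same_down_alt map y
instance (map : List (List Int)) (y : Int) (out : Int) : Decidable (Spec_compare_left_right_same_down map y out) := by unfold Spec_compare_left_right_same_down; infer_instance

-- ===== CLAIM (what is proved, stated in full; the proofs are below) =====
def Claim_equal_compare_left_right_same_down : Prop := ∀ (map : List (List Int)) (y : Int), Dom_compare_left_right_same_down map y → Pre_compare_left_right_same_down map y → Spec_compare_left_right_same_down map y (compare_left_right_same_down map y)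

-- ===== LEMMAS AND PROOFS =====

-- abbreviations for A's fold body (proof-side only)
def pvAStep (step : Int) (st : List Int × Int) (block : Int) : List Int × Int :=
  if block ≠ 0 then
    if PySem.List.pyGetD st.1 st.2 0 = 0 then
      (PySem.List.pySetD st.1 st.2 block, st.2)
    else if PySem.List.pyGetD st.1 st.2 0 = block then
      (PySem.List.pySetD st.1 st.2 (PySem.List.pyGetD st.1 st.2 0 + block), st.2)
    else
      (PySem.List.pySetD st.1 (st.2 + step) block, st.2 + step)
  else st

-- the one-merged-tile-at-a-time fold that A's pointer walk and B's recursion both realize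
def pvPackStep (out : List Int) (t : Int) : List Int :=
  if t = 0 then out
  else
    match out.getLast? with
    | some l => if l = t then out.dropLast ++ [l + t] else out ++ [t]
    | none => out ++ [t]

def pvPack (cells : List Int) : List Int := cells.foldl pvPackStep []

def pvPadL (m : List Int) : List Int := m ++ List.replicate (8 - m.length) 0
def pvPadR (m : List Int) : List Int := List.replicate (8 - m.length) 0 ++ m.reverse

lemma pvPack_ne_nil (acc : List Int) (h : acc ≠ []) (cells : List Int) :
    cells.foldl pvPackStep acc ≠ [] := by
  induction cells generalizing acc with
  | nil => exact h
  | cons t rest ih =>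
    refine ih _ ?_
    unfold pvPackStep
    split
    · exact h
    · cases acc.getLast? with
      | none => simp
      | some l => by_cases hlt : l = t <;> simp [hlt]

lemma pvGetMid (q zs : List Int) (a : Int) : PySem.List.pyGetD (q ++ a :: zs) (q.length : Int) 0 = a := by
  rw [PySem.List.pyGetD_natCast]
  simp [List.getD_eq_getElem?_getD]

lemma pvSetMid (q zs : List Int) (a v : Int) : PySem.List.pySetD (q ++ a :: zs) (q.length : Int) v = q ++ v :: zs := by
  rw [PySem.List.pySetD_natCast, List.set_append_right _ _ (le_refl _)]
  simp

lemma pvStep_skip (st : List Int × Int) : pvAStep 1 st 0 = st := by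
  simp [pvAStep]

lemma pvStep_skip' (st : List Int × Int) : pvAStep (-1) st 0 = st := by
  simp [pvAStep]

lemma pvStep_merge (s q zs : List Int) (p : Int) (a t : Int) (ha : a ≠ 0) (hat : a = t) (ht : t ≠ 0)
    (hs : s = q ++ a :: zs) (hp : p = (q.length : Int)) (step : Int) :
    pvAStep step (s, p) t = (q ++ (a + t) :: zs, p) := by
  subst hs hp
  simp [pvAStep, ht, pvGetMid, ha, hat]

lemma pvStep_new (s q zs : List Int) (p : Int) (a t : Int) (ha : a ≠ 0) (hat : a ≠ t) (ht : t ≠ 0)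
    (hs : s = q ++ a :: 0 :: zs) (hp : p = (q.length : Int)) :
    pvAStep 1 (s, p) t = ((q ++ [a]) ++ t :: zs, p + 1) := by
  subst hs hp
  have e1 : q ++ a :: (0:Int) :: zs = (q ++ [a]) ++ 0 :: zs := by simp
  have e2 : (q.length : Int) + 1 = ((q ++ [a]).length : Int) := by simp
  have hget : PySem.List.pyGetD (q ++ a :: (0:Int) :: zs) (q.length : Int) 0 = a := pvGetMid q _ a
  have hset : PySem.List.pySetD (q ++ a :: (0:Int) :: zs) ((q.length : Int) + 1) t = (q ++ [a]) ++ t :: zs := by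
    rw [e1, e2, pvSetMid]
  simp only [pvAStep, hget, hset]
  simp [ht, ha, hat]

lemma pvPackStep_zero (out : List Int) : pvPackStep out 0 = out := by simp [pvPackStep]

lemma pvPackStep_merge (q : List Int) (a t : Int) (hat : a = t) (ht : t ≠ 0) :
    pvPackStep (q ++ [a]) t = q ++ [a + t] := by
  simp [pvPackStep, ht, hat]

lemma pvPackStep_new (q : List Int) (a t : Int) (hat : a ≠ t) (ht : t ≠ 0) :
    pvPackStep (q ++ [a]) t = (q ++ [a]) ++ [t] := by
  simp [pvPackStep, ht, hat]

lemma pvPackStep_nil (t : Int) (ht : t ≠ 0) : pvPackStep [] t = [t] := by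
  simp [pvPackStep, ht]

lemma pvLeftInv (cells : List Int) : ∀ (acc : List Int), acc ≠ [] → (0:Int) ∉ acc →
    acc.length + cells.length ≤ 8 →
    cells.foldl (pvAStep 1) (pvPadL acc, (acc.length : Int) - 1)
      = (pvPadL (cells.foldl pvPackStep acc), ((cells.foldl pvPackStep acc).length : Int) - 1) := by
  induction cells with
  | nil => intro acc _ _ _; rfl
  | cons t rest ih =>
    intro acc hne h0 hlen
    obtain ⟨q, a, rfl⟩ := (acc.eq_nil_or_concat).resolve_left hne
    simp only [List.concat_eq_append] at hne h0 hlen ⊢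
    have ha : a ≠ 0 := fun h => h0 (by simp [h])
    have h0q : (0:Int) ∉ q := fun h => h0 (by simp [h])
    have hqlen : q.length + 1 + (rest.length + 1) ≤ 8 := by
      simpa [List.length_append] using hlen
    have hplen : (((q ++ [a]).length : Int)) - 1 = (q.length : Int) := by simp
    have hpad : pvPadL (q ++ [a]) = q ++ a :: List.replicate (8 - (q.length + 1)) 0 := by
      simp [pvPadL]
    simp only [List.foldl_cons, hplen, hpad]
    by_cases ht : t = 0
    · subst ht
      rw [pvStep_skip, pvPackStep_zero, ← hpad, ← hplen]
      exact ih (q ++ [a]) hne h0 (by simp at hqlen ⊢; omega)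
    · by_cases hat : a = t
      · rw [pvStep_merge _ q _ _ a t ha hat ht rfl rfl,
            pvPackStep_merge q a t hat ht]
        have h0' : (0:Int) ∉ q ++ [a + t] := by
          simp only [List.mem_append, List.mem_singleton]
          rintro (hz | hz)
          · exact h0q hz
          · subst hat; omega
        have hpad' : pvPadL (q ++ [a + t]) = q ++ (a + t) :: List.replicate (8 - (q.length + 1)) 0 := by
          simp [pvPadL]
        have hplen' : (((q ++ [a + t]).length : Int)) - 1 = (q.length : Int) := by simp
        rw [← hpad', ← hplen']
        exact ih (q ++ [a + t]) (by simp) h0' (by simp; omega)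
      · have hrep : List.replicate (8 - (q.length + 1)) (0:Int)
            = 0 :: List.replicate (8 - (q.length + 2)) 0 := by
          rw [show 8 - (q.length + 1) = (8 - (q.length + 2)) + 1 from by omega]
          rfl
        rw [hrep, pvStep_new _ q _ _ a t ha hat ht rfl rfl,
            pvPackStep_new q a t hat ht]
        have h0' : (0:Int) ∉ (q ++ [a]) ++ [t] := by
          simp only [List.mem_append, List.mem_singleton]
          rintro ((hz | hz) | hz)
          · exact h0q hz
          · exact ha hz.symm
          · exact ht hz.symm
        have hpad' : pvPadL ((q ++ [a]) ++ [t]) = (q ++ [a]) ++ t :: List.replicate (8 - (q.length + 2)) 0 := by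
          unfold pvPadL
          rw [show ((q ++ [a]) ++ [t]).length = q.length + 2 from by simp, List.append_assoc]
          rfl
        have hplen' : ((((q ++ [a]) ++ [t]).length : Int)) - 1 = (q.length : Int) + 1 := by
          simp
          omega
        rw [← hpad', ← hplen']
        exact ih ((q ++ [a]) ++ [t]) (by simp) h0' (by simp; omega)

lemma pvStep_fill (s q zs : List Int) (p : Int) (t : Int) (ht : t ≠ 0)
    (hs : s = q ++ 0 :: zs) (hp : p = (q.length : Int)) (step : Int) :
    pvAStep step (s, p) t = (q ++ t :: zs, p) := by
  subst hs hp
  simp [pvAStep, ht, pvGetMid]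

lemma pvStep_new_neg (s w zs : List Int) (p : Int) (a t : Int) (ha : a ≠ 0) (hat : a ≠ t) (ht : t ≠ 0)
    (hs : s = w ++ 0 :: a :: zs) (hp : p = (w.length : Int) + 1) :
    pvAStep (-1) (s, p) t = (w ++ t :: a :: zs, p + (-1)) := by
  subst hs hp
  have hget : PySem.List.pyGetD (w ++ (0:Int) :: a :: zs) ((w.length : Int) + 1) 0 = a := by
    have e1 : w ++ (0:Int) :: a :: zs = (w ++ [0]) ++ a :: zs := by simp
    have e2 : (w.length : Int) + 1 = ((w ++ [(0:Int)]).length : Int) := by simp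
    rw [e1, e2, pvGetMid]
  have hset : PySem.List.pySetD (w ++ (0:Int) :: a :: zs) ((w.length : Int) + 1 + (-1)) t
      = w ++ t :: a :: zs := by
    rw [show (w.length : Int) + 1 + (-1) = (w.length : Int) from by omega, pvSetMid]
  simp only [pvAStep, hget, hset]
  simp [ht, ha, hat]

lemma pvRightInv (cells : List Int) : ∀ (acc : List Int), acc ≠ [] → (0:Int) ∉ acc →
    acc.length + cells.length ≤ 8 →
    cells.foldl (pvAStep (-1)) (pvPadR acc, (8 : Int) - acc.length)
      = (pvPadR (cells.foldl pvPackStep acc), (8 : Int) - (cells.foldl pvPackStep acc).length) := by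
  induction cells with
  | nil => intro acc _ _ _; rfl
  | cons t rest ih =>
    intro acc hne h0 hlen
    obtain ⟨q, a, rfl⟩ := (acc.eq_nil_or_concat).resolve_left hne
    simp only [List.concat_eq_append] at hne h0 hlen ⊢
    have ha : a ≠ 0 := fun h => h0 (by simp [h])
    have h0q : (0:Int) ∉ q := fun h => h0 (by simp [h])
    have hqlen : q.length + 1 + (rest.length + 1) ≤ 8 := by
      simpa [List.length_append] using hlen
    have hpad : pvPadR (q ++ [a]) = List.replicate (8 - (q.length + 1)) 0 ++ a :: q.reverse := by
      unfold pvPadR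
      rw [show (q ++ [a]).length = q.length + 1 from by simp]
      simp
    have hplen : (8 : Int) - ((q ++ [a]).length : Int)
        = ((List.replicate (8 - (q.length + 1)) (0:Int)).length : Int) := by
      simp
      omega
    simp only [List.foldl_cons, hplen, hpad]
    by_cases ht : t = 0
    · subst ht
      rw [pvStep_skip', pvPackStep_zero, ← hpad, ← hplen]
      exact ih (q ++ [a]) hne h0 (by simp at hqlen ⊢; omega)
    · by_cases hat : a = t
      · rw [pvStep_merge _ (List.replicate (8 - (q.length + 1)) 0) _ _ a t ha hat ht rfl (by simp),
            pvPackStep_merge q a t hat ht]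
        have h0' : (0:Int) ∉ q ++ [a + t] := by
          simp only [List.mem_append, List.mem_singleton]
          rintro (hz | hz)
          · exact h0q hz
          · subst hat; omega
        have hpad' : pvPadR (q ++ [a + t]) = List.replicate (8 - (q.length + 1)) 0 ++ (a + t) :: q.reverse := by
          unfold pvPadR
          rw [show (q ++ [a + t]).length = q.length + 1 from by simp]
          simp
        have hplen' : ((List.replicate (8 - (q.length + 1)) (0:Int)).length : Int)
            = (8 : Int) - ((q ++ [a + t]).length : Int) := by
          simp
          omega
        rw [← hpad', hplen']
        exact ih (q ++ [a + t]) (by simp) h0' (by simp; omega)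
      · have hrep : List.replicate (8 - (q.length + 1)) (0:Int)
            = List.replicate (8 - (q.length + 2)) 0 ++ [(0:Int)] := by
          rw [show 8 - (q.length + 1) = (8 - (q.length + 2)) + 1 from by omega, List.replicate_succ']
        have hs : List.replicate (8 - (q.length + 1)) (0:Int) ++ a :: q.reverse
            = List.replicate (8 - (q.length + 2)) 0 ++ 0 :: a :: q.reverse := by
          rw [hrep]; simp
        have hp : ((List.replicate (8 - (q.length + 1)) (0:Int)).length : Int)
            = ((List.replicate (8 - (q.length + 2)) (0:Int)).length : Int) + 1 := by
          simp
          omega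
        rw [pvStep_new_neg _ (List.replicate (8 - (q.length + 2)) 0) _ _ a t ha hat ht hs hp,
            pvPackStep_new q a t hat ht]
        have h0' : (0:Int) ∉ (q ++ [a]) ++ [t] := by
          simp only [List.mem_append, List.mem_singleton]
          rintro ((hz | hz) | hz)
          · exact h0q hz
          · exact ha hz.symm
          · exact ht hz.symm
        have hpad' : pvPadR ((q ++ [a]) ++ [t])
            = List.replicate (8 - (q.length + 2)) 0 ++ t :: a :: q.reverse := by
          unfold pvPadR
          rw [show ((q ++ [a]) ++ [t]).length = q.length + 2 from by simp]
          simp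
        have hplen' : ((List.replicate (8 - (q.length + 1)) (0:Int)).length : Int) + (-1)
            = (8 : Int) - (((q ++ [a]) ++ [t]).length : Int) := by
          simp
          omega
        rw [← hpad', hplen']
        exact ih ((q ++ [a]) ++ [t]) (by simp) h0' (by simp; omega)

lemma pvLeftInv0 (cells : List Int) (h : cells.length ≤ 8) :
    cells.foldl (pvAStep 1) (List.replicate 8 0, 0)
      = (pvPadL (pvPack cells), if pvPack cells = [] then 0 else ((pvPack cells).length : Int) - 1) := by
  induction cells with
  | nil => rfl
  | cons t rest ih =>
    simp only [pvPack, List.foldl_cons]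
    by_cases ht : t = 0
    · subst ht
      rw [pvStep_skip, pvPackStep_zero]
      exact ih (by simp at h ⊢; omega)
    · have hs : (List.replicate 8 (0:Int)) = [] ++ 0 :: List.replicate 7 0 := by decide
      rw [pvStep_fill _ ([] : List Int) (List.replicate 7 0) _ t ht hs (by simp),
        pvPackStep_nil t ht]
      have hstart : (([] : List Int) ++ t :: List.replicate 7 0, (0:Int))
          = (pvPadL [t], (([t] : List Int).length : Int) - 1) := by
        simp [pvPadL]
      rw [hstart, pvLeftInv rest [t] (by simp) (by simp [Ne.symm ht]) (by simp at h ⊢; omega)]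
      rw [if_neg (pvPack_ne_nil [t] (by simp) rest)]

lemma pvRightInv0 (cells : List Int) (h : cells.length ≤ 8) :
    cells.foldl (pvAStep (-1)) (List.replicate 8 0, 7)
      = (pvPadR (pvPack cells), if pvPack cells = [] then 7 else (8 : Int) - (pvPack cells).length) := by
  induction cells with
  | nil => rfl
  | cons t rest ih =>
    simp only [pvPack, List.foldl_cons]
    by_cases ht : t = 0
    · subst ht
      rw [pvStep_skip', pvPackStep_zero]
      exact ih (by simp at h ⊢; omega)
    · have hs : (List.replicate 8 (0:Int)) = List.replicate 7 0 ++ 0 :: [] := by decide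
      rw [pvStep_fill _ (List.replicate 7 0) ([] : List Int) _ t ht hs (by simp), pvPackStep_nil t ht]
      have hstart : ((List.replicate 7 (0:Int)) ++ t :: [], (7 : Int))
          = (pvPadR [t], (8 : Int) - (([t] : List Int).length : Int)) := by
        simp [pvPadR]
      rw [hstart, pvRightInv rest [t] (by simp) (by simp [Ne.symm ht]) (by simp at h ⊢; omega)]
      rw [if_neg (pvPack_ne_nil [t] (by simp) rest)]

lemma pvMoveRowA_eq (row : List Int) (start stop step : Int) :
    pvMoveRowA row start stop step
      = (((PySem.List.pyRange start stop step).map (fun i => PySem.List.pyGetD row i 0)).foldl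
          (pvAStep step) (List.replicate 8 0, start)).1 := by
  rw [List.foldl_map]; rfl

-- ===== bridge: the fold-pack equals B's recursive group-consuming pack =====

lemma pvPack_skip_zeros (cells : List Int) : ∀ acc : List Int,
    cells.foldl pvPackStep acc = (cells.filter (fun t => t != 0)).foldl pvPackStep acc := by
  induction cells with
  | nil => intro acc; rfl
  | cons t rest ih =>
    intro acc
    by_cases ht : t = 0
    · subst ht
      simp [pvPackStep_zero, ih]
    · simp [List.filter_cons, ht, ih]

lemma pvFold_consume (tiles : List Int) : ∀ (q : List Int) (a : Int), (∀ t ∈ tiles, t ≠ 0) →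
    tiles.foldl pvPackStep (q ++ [a])
      = q ++ (pvConsume a tiles).1 :: pvPackRec (pvConsume a tiles).2 := by
  induction tiles with
  | nil => intro q a _; simp [pvConsume, pvPackRec]
  | cons t r ih =>
    intro q a hnz
    have ht : t ≠ 0 := hnz t (by simp)
    have hr : ∀ u ∈ r, u ≠ 0 := fun u hu => hnz u (by simp [hu])
    by_cases hat : a = t
    · rw [List.foldl_cons, pvPackStep_merge q a t hat ht, ih q (a + t) hr]
      simp [pvConsume, hat.symm]
    · rw [List.foldl_cons, pvPackStep_new q a t hat ht, ih (q ++ [a]) t hr]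
      have hc : pvConsume a (t :: r) = (a, t :: r) := by
        unfold pvConsume
        rw [if_neg (fun h : t = a => hat h.symm)]
      have hu : pvPackRec (t :: r) = (pvConsume t r).1 :: pvPackRec (pvConsume t r).2 := by
        rw [pvPackRec]
      rw [hc, hu]
      simp

lemma pvPack_eq_rec (cells : List Int) :
    pvPack cells = pvPackRec (cells.filter (fun t => t != 0)) := by
  unfold pvPack
  rw [pvPack_skip_zeros]
  cases hf : cells.filter (fun t => t != 0) with
  | nil => simp [pvPackRec]
  | cons t r =>
    have hnzall : ∀ u ∈ t :: r, u ≠ 0 := by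
      intro u hu
      have := List.of_mem_filter (hf ▸ hu)
      simpa using this
    have ht : t ≠ 0 := hnzall t (by simp)
    have hr : ∀ u ∈ r, u ≠ 0 := fun u hu => hnzall u (by simp [hu])
    rw [List.foldl_cons, pvPackStep_nil t ht,
      show [t] = [] ++ [t] from rfl, pvFold_consume r [] t hr]
    rw [pvPackRec]
    rfl

lemma pvPackRec_length_le (l : List Int) : (pvPackRec l).length ≤ l.length := by
  induction l using pvPackRec.induct with
  | case1 => simp [pvPackRec]
  | case2 t r ih =>
    rw [pvPackRec]
    have := pvConsume_len_le t r
    simpa using Nat.succ_le_succ (le_trans ih this)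

-- ===== bridge: padded-row lookups equal B's index-arithmetic getters =====

lemma pvPadL_get (m : List Int) (hm : m.length ≤ 8) (i : Int) (h0 : 0 ≤ i) (h8 : i < 8) :
    PySem.List.pyGetD (pvPadL m) i 0
      = (if i < (m.length : Int) then PySem.List.pyGetD m i 0 else 0) := by
  obtain ⟨n, rfl⟩ := Int.eq_ofNat_of_zero_le h0
  rw [PySem.List.pyGetD_natCast, PySem.List.pyGetD_natCast]
  unfold pvPadL
  by_cases hn : n < m.length
  · rw [if_pos (by exact_mod_cast hn), List.getD_append _ _ _ _ hn]
  · rw [if_neg (by exact_mod_cast hn)]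
    simp only [List.getD_eq_getElem?_getD]
    rw [List.getElem?_append_right (Nat.le_of_not_lt hn)]
    simp [List.getElem?_replicate]
    split <;> rfl

lemma pvPadR_get (m : List Int) (hm : m.length ≤ 8) (i : Int) (h0 : 0 ≤ i) (h8 : i < 8) :
    PySem.List.pyGetD (pvPadR m) i 0
      = (if 8 - (m.length : Int) ≤ i then PySem.List.pyGetD m (8 - 1 - i) 0 else 0) := by
  obtain ⟨n, rfl⟩ := Int.eq_ofNat_of_zero_le h0
  have hn8 : n < 8 := by exact_mod_cast h8
  rw [PySem.List.pyGetD_natCast]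
  unfold pvPadR
  by_cases hc : 8 - (m.length : Int) ≤ (n : Int)
  · rw [if_pos hc]
    have hj : m.length - 1 - (n - (8 - m.length)) = 7 - n := by omega
    have hlt : n - (8 - m.length) < m.length := by omega
    have hge : (List.replicate (8 - m.length) (0:Int)).length ≤ n := by simp; omega
    rw [show ((8:Int) - 1 - (n:Int)) = ((7 - n : Nat) : Int) from by omega,
      PySem.List.pyGetD_natCast]
    simp only [List.getD_eq_getElem?_getD]
    rw [List.getElem?_append_right hge]
    simp only [List.length_replicate]
    rw [List.getElem?_reverse hlt, hj]
  · rw [if_neg hc]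
    have hlt : n < (List.replicate (8 - m.length) (0:Int)).length := by simp; omega
    simp only [List.getD_eq_getElem?_getD]
    rw [List.getElem?_append_left hlt]
    have hlt2 : n < 8 - m.length := by omega
    simp [List.getElem?_replicate, hlt2]

-- A's check fold equals B's score fold once the getters agree on 0..7
lemma pvCheck_eq_score (below : List Int) (y : Int) (row : List Int) (at_ : Int → Int)
    (hget : ∀ i : Int, 0 ≤ i → i < 8 → PySem.List.pyGetD row i 0 = at_ i) :
    pvCheckA below y row = pvScoreB below y at_ := by
  unfold pvCheckA pvScoreB
  apply PySem.List.foldl_congr_mem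
  intro acc x hx
  obtain ⟨hx0, hx8⟩ := (PySem.List.mem_pyRange_one).mp hx
  have hexp : ((8:Int) - x ≠ 0) := by omega
  rw [hget x hx0 hx8]
  simp [hexp]

theorem pv_main (map : List (List Int)) (y : Int)
    (hp : Pre_compare_left_right_same_down map y) :
    compare_left_right_same_down map y = compare_left_right_same_down_alt map y := by
  by_cases hy : y = 8 - 1
  · simp [compare_left_right_same_down, compare_left_right_same_down_alt, hy]
  · have hlen : 8 ≤ ((PySem.List.pyGet? map y).getD []).length := by
      rcases hp with h7 | ⟨h, _⟩
      · exact absurd (by omega : y = 8 - 1) hy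
      · exact h
    simp only [compare_left_right_same_down, compare_left_right_same_down_alt, if_neg hy]
    set row := (PySem.List.pyGet? map y).getD [] with hrow
    set below := (PySem.List.pyGet? map (y + 1)).getD [] with hbelow
    set cellsL := (PySem.List.pyRange 0 8 1).map (fun i => PySem.List.pyGetD row i 0) with hcellsL
    set cellsR := (PySem.List.pyRange 0 8 1).map (fun i => PySem.List.pyGetD row (7 - i) 0) with hcellsR
    -- right-to-left scan = map over reversed range
    have hcellsR' : (PySem.List.pyRange 7 (-1) (-1)).map (fun i => PySem.List.pyGetD row i 0) = cellsR := by
      rw [hcellsR,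
        show PySem.List.pyRange 7 (-1) (-1) = (PySem.List.pyRange 0 8 1).map (fun i => (7:Int) - i) from by decide,
        List.map_map]
      rfl
    have hlen8 : (PySem.List.pyRange 0 8 1).length = 8 := by decide
    have hlenL : cellsL.length = 8 := by rw [hcellsL, List.length_map, hlen8]
    have hlenR : cellsR.length = 8 := by rw [hcellsR, List.length_map, hlen8]
    -- cellsL is the first 8 entries of the row; cellsR its reverse
    have htake : PySem.List.slice row none (some 8) = row.take 8 := by
      rw [show (8:Int) = ((8:Nat):Int) from rfl, PySem.List.slice_to_natCast]
    have hcellsL_take : cellsL = row.take 8 := by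
      have h8 : ((row.take 8).length : Int) = 8 := by
        simp [List.length_take]
        omega
      have hmapc : cellsL = (PySem.List.pyRange 0 8 1).map (fun i => PySem.List.pyGetD (row.take 8) i 0) := by
        rw [hcellsL]
        apply List.map_congr_left
        intro i hi
        obtain ⟨h0, hi8⟩ := (PySem.List.mem_pyRange_one).mp hi
        obtain ⟨n, rfl⟩ := Int.eq_ofNat_of_zero_le h0
        have hn8 : n < 8 := by exact_mod_cast hi8
        rw [PySem.List.pyGetD_natCast, PySem.List.pyGetD_natCast]
        simp [List.getD_eq_getElem?_getD, List.getElem?_take, hn8]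
      rw [hmapc, show (8:Int) = ((row.take 8).length : Int) from h8.symm]
      exact PySem.List.map_pyGetD_pyRange_zero' (row.take 8) 0
    have hcellsR_rev : cellsR = cellsL.reverse := by
      rw [hcellsL, ← List.map_reverse,
        show (PySem.List.pyRange 0 8 1).reverse = (PySem.List.pyRange 0 8 1).map (fun i => (7:Int) - i) from by decide,
        List.map_map]
      rfl
    -- B's tiles and packs in terms of the fold-pack
    have htiles : (PySem.List.slice row none (some 8)).filter (fun t => t != 0)
        = cellsL.filter (fun t => t != 0) := by
      rw [htake, hcellsL_take]
    have hlp : pvPackRec ((PySem.List.slice row none (some 8)).filter (fun t => t != 0))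
        = pvPack cellsL := by
      rw [htiles, ← pvPack_eq_rec]
    have hrp : pvPackRec (((PySem.List.slice row none (some 8)).filter (fun t => t != 0)).reverse)
        = pvPack cellsR := by
      rw [htiles, ← List.filter_reverse, ← hcellsR_rev, ← pvPack_eq_rec]
    have hlplen : (pvPack cellsL).length ≤ 8 := by
      rw [pvPack_eq_rec]
      calc (pvPackRec (cellsL.filter (fun t => t != 0))).length
          ≤ (cellsL.filter (fun t => t != 0)).length := pvPackRec_length_le _
        _ ≤ cellsL.length := List.length_filter_le _ _
        _ = 8 := hlenL
    have hrplen : (pvPack cellsR).length ≤ 8 := by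
      rw [pvPack_eq_rec]
      calc (pvPackRec (cellsR.filter (fun t => t != 0))).length
          ≤ (cellsR.filter (fun t => t != 0)).length := pvPackRec_length_le _
        _ ≤ cellsR.length := List.length_filter_le _ _
        _ = 8 := hlenR
    -- evaluate A's two moves, then both scores
    rw [pvMoveRowA_eq, pvMoveRowA_eq, hcellsR', ← hcellsL]
    rw [pvLeftInv0 cellsL (le_of_eq hlenL), pvRightInv0 cellsR (le_of_eq hlenR)]
    simp only [hlp, hrp]
    rw [pvCheck_eq_score below y (pvPadL (pvPack cellsL))
          (fun i => if i < ((pvPack cellsL).length : Int) then PySem.List.pyGetD (pvPack cellsL) i 0 else 0)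
          (fun i h0 h8 => pvPadL_get (pvPack cellsL) hlplen i h0 h8),
        pvCheck_eq_score below y (pvPadR (pvPack cellsR))
          (fun i => if 8 - ((pvPack cellsR).length : Int) ≤ i then PySem.List.pyGetD (pvPack cellsR) (8 - 1 - i) 0 else 0)
          (fun i h0 h8 => pvPadR_get (pvPack cellsR) hrplen i h0 h8)]

-- ===== VERDICT (by name: the statement is the Claim_ definition above) =====
theorem compare_left_right_same_down_spec : Claim_equal_compare_left_right_same_down := by
  intro map y _ hp
  exact pv_main map y hp
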